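-- pv_equiv track=rewrite | github.com/zzy451/sketch_mutated | helpers.py | _adaptive_single_tree_target_from_hints
-- ===== SOURCE A (Python) =====
-- def _dominant_failure_bucket_from_hints(hints):
--     if not isinstance(hints, dict):
--         return ""
--     buckets = [str(x).strip() for x in list(hints.get("failure_buckets", []))]
--     buckets = [b for b in buckets if b]
--     return buckets[0] if buckets else ""
--
-- def _adaptive_single_tree_target_from_hints(profile, hints, allowed_targets=None, fallback="update"):
--     allowed = []
--     for x in list(allowed_targets or []):
--         sx = str(x).strip().lower()
--         if sx in {"init", "init_dex"}:
--             sx = "init_dex"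
--         if sx in {"init_dex", "update", "query"} and sx not in allowed:
--             allowed.append(sx)
--     if not allowed:
--         allowed = ["update", "query", "init_dex"]
--     prof_name = str((profile or {}).get("name", "") or "").strip().lower()
--     dominant = _dominant_failure_bucket_from_hints(hints)
--     target = str(fallback or "update")
--     reason = "fallback_default"
--     if dominant in {"bad_write_ctx", "real_write_zero"} and "update" in allowed:
--         target = "update"
--         reason = f"{dominant}_dominates"
--     elif dominant in {"query_date_zero", "read_error", "generic_read"} and "query" in allowed:
--         target = "query"
--         reason = f"{dominant}_dominates"
--     elif dominant == "nonconst_path":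
--         if "query" in allowed:
--             target = "query"
--             reason = "nonconst_path_prefers_query"
--         elif "update" in allowed:
--             target = "update"
--             reason = "nonconst_path_fallback_update"
--     elif dominant in {"nonconst_hash", "collision"}:
--         if prof_name == "init_explore" and "init_dex" in allowed:
--             target = "init_dex"
--             reason = f"{dominant}_dominates_init_explore"
--         elif "query" in allowed:
--             target = "query"
--             reason = f"{dominant}_fallback_query"
--         elif "update" in allowed:
--             target = "update"
--             reason = f"{dominant}_fallback_update"
--     if target not in allowed:
--         target = allowed[0]
--         reason = f"normalize_to_allowed:{reason}"
--     return target, reason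
-- ===== SOURCE B (Python) =====
-- def _dominant_failure_bucket_from_hints(hints):
--     if not isinstance(hints, dict):
--         return ""
--     for x in list(hints.get("failure_buckets", [])):
--         b = str(x).strip()
--         if b:
--             return b
--     return ""
--
-- # ordered target-preference list for each failure bucket
-- _PREFS = {
--     "bad_write_ctx": ["update"], "real_write_zero": ["update"],
--     "query_date_zero": ["query"], "read_error": ["query"], "generic_read": ["query"],
--     "nonconst_path": ["query", "update"],
--     "nonconst_hash": ["init_dex", "query", "update"],
--     "collision": ["init_dex", "query", "update"],
-- }
--
-- def _reason(dominant, target):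
--     if dominant == "nonconst_path":
--         return "nonconst_path_prefers_query" if target == "query" else "nonconst_path_fallback_update"
--     if dominant in ("nonconst_hash", "collision"):
--         return dominant + ("_dominates_init_explore" if target == "init_dex" else "_fallback_" + target)
--     return dominant + "_dominates"
--
-- def _adaptive_single_tree_target_from_hints(profile, hints, allowed_targets=None, fallback="update"):
--     canon = []
--     for x in list(allowed_targets or []):
--         sx = str(x).strip().lower()
--         if sx == "init":
--             sx = "init_dex"
--         if sx in ("init_dex", "update", "query"):
--             canon.append(sx)
--     allowed = list(dict.fromkeys(canon)) or ["update", "query", "init_dex"]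
--     prof_name = str((profile or {}).get("name", "") or "").strip().lower()
--     dominant = _dominant_failure_bucket_from_hints(hints)
--     prefs = _PREFS.get(dominant, [])
--     if prefs and prefs[0] == "init_dex" and prof_name != "init_explore":
--         prefs = prefs[1:]
--     for t in prefs:
--         if t in allowed:
--             return t, _reason(dominant, t)
--     fb = str(fallback or "update")
--     if fb in allowed:
--         return fb, "fallback_default"
--     return allowed[0], "normalize_to_allowed:fallback_default"
-- ===== Notes on version B (the rewrite author's own statement) =====
-- stated objective: simpler
-- what changed: The fixed if/elif cascade is replaced by a per-bucket preference-list table (_PREFS) scanned with an early-return loop for the first allowed target, with the reason derived from (dominant, target) by a small helper; the allowed-targets dedup-while-appending loop becomes collect-then-dict.fromkeys, and the dominant bucket is found by a first-match loop instead of filter-then-index.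
import Mathlib
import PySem

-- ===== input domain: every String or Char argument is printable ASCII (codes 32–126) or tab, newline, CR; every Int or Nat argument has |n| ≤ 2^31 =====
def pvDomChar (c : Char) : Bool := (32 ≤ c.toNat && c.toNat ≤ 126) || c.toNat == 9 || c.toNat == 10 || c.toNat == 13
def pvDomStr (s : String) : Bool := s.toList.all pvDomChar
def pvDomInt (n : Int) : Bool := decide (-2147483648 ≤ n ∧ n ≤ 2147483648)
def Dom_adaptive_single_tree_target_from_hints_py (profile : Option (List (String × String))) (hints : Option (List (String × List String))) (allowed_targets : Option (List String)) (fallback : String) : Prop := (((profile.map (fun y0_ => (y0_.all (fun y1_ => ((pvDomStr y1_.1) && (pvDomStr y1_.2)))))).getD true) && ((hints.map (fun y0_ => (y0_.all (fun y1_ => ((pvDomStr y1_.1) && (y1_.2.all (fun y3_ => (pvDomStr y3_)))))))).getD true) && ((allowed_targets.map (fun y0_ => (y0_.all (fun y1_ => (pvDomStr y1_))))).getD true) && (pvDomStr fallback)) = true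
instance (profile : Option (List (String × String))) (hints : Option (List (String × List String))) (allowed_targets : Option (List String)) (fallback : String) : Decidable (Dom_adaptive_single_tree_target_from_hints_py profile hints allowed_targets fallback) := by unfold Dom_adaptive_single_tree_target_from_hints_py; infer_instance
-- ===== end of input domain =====

-- B replaces A's fixed if/elif cascade by a per-bucket preference-list table scanned for the first
-- allowed target (reason derived from the chosen target), and replaces A's dedup-while-appending
-- loop by append-all-then-dict.fromkeys (objective: simpler); same return value as A everywhere.

-- ===== PORT A =====
-- Port of A (helpers.py). `str(...)` on values that are already strings is the identity;
-- `x or ""`/`fallback or "update"` test string emptiness. Dicts arrive as assoc lists (first-match lookup).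

-- helper _dominant_failure_bucket_from_hints: strip each bucket, drop empties, take the first
def pvA_dominant (hints : Option (List (String × List String))) : String :=
  match hints with
  | none => ""          -- not a dict
  | some h =>
    let buckets := ((PySem.Dict.mk h).getD "failure_buckets" []).map PySem.Str.strip
    let buckets := buckets.filter (fun b => b != "")
    match buckets with
    | [] => ""
    | b :: _ => b

-- body of A's allowed-targets normalisation loop (dedup while appending)
def pvA_step (acc : List String) (x : String) : List String :=
  let sx := PySem.Str.lower (PySem.Str.strip x)
  let sx := if sx = "init" ∨ sx = "init_dex" then "init_dex" else sx
  if (sx = "init_dex" ∨ sx = "update" ∨ sx = "query") ∧ sx ∉ acc then acc ++ [sx] else acc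

-- the allowed-targets normalisation loop of A
def pvA_allowed (allowed_targets : Option (List String)) : List String :=
  let allowed := (allowed_targets.getD []).foldl pvA_step []
  if allowed = [] then ["update", "query", "init_dex"] else allowed

-- the if/elif cascade of A plus the final normalize-to-allowed step
def pvA_select (allowed : List String) (prof_name dominant fallback : String) : String × String :=
  let target := if fallback = "" then "update" else fallback
  let reason := "fallback_default"
  let tr :=
    if (dominant = "bad_write_ctx" ∨ dominant = "real_write_zero") ∧ "update" ∈ allowed then
      ("update", dominant ++ "_dominates")
    else if (dominant = "query_date_zero" ∨ dominant = "read_error" ∨ dominant = "generic_read") ∧ "query" ∈ allowed then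
      ("query", dominant ++ "_dominates")
    else if dominant = "nonconst_path" then
      if "query" ∈ allowed then ("query", "nonconst_path_prefers_query")
      else if "update" ∈ allowed then ("update", "nonconst_path_fallback_update")
      else (target, reason)
    else if dominant = "nonconst_hash" ∨ dominant = "collision" then
      if prof_name = "init_explore" ∧ "init_dex" ∈ allowed then ("init_dex", dominant ++ "_dominates_init_explore")
      else if "query" ∈ allowed then ("query", dominant ++ "_fallback_query")
      else if "update" ∈ allowed then ("update", dominant ++ "_fallback_update")
      else (target, reason)
    else (target, reason)
  if tr.1 ∉ allowed then (PySem.List.pyGetD allowed 0 "", "normalize_to_allowed:" ++ tr.2) else tr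

def adaptive_single_tree_target_from_hints_py (profile : Option (List (String × String))) (hints : Option (List (String × List String))) (allowed_targets : Option (List String)) (fallback : String) : String × String :=
  let allowed := pvA_allowed allowed_targets
  let prof_name := PySem.Str.lower (PySem.Str.strip ((PySem.Dict.mk (profile.getD [])).getD "name" ""))
  let dominant := pvA_dominant hints
  pvA_select allowed prof_name dominant fallback

-- ===== PORT B =====
-- Port of B (Source B): dominant via an early-return loop, allowed via collect-then-dict.fromkeys
-- (PySem.List.dedup), and the selection as a table (_PREFS) of per-bucket target preference lists
-- scanned for the first allowed target, with the reason computed from (dominant, target).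

-- helper _dominant_failure_bucket_from_hints of Source B: return the first non-empty stripped bucket
def pvB_firstBucket : List String → String
  | [] => ""
  | x :: rest =>
    let b := PySem.Str.strip x
    if b ≠ "" then b else pvB_firstBucket rest

def pvB_dominant (hints : Option (List (String × List String))) : String :=
  match hints with
  | none => ""          -- not a dict
  | some h => pvB_firstBucket ((PySem.Dict.mk h).getD "failure_buckets" [])

-- _PREFS: ordered target-preference list per failure bucket
def pvB_prefs : PySem.Dict String (List String) :=
  PySem.Dict.ofList
    [("bad_write_ctx", ["update"]), ("real_write_zero", ["update"]),
     ("query_date_zero", ["query"]), ("read_error", ["query"]), ("generic_read", ["query"]),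
     ("nonconst_path", ["query", "update"]),
     ("nonconst_hash", ["init_dex", "query", "update"]),
     ("collision", ["init_dex", "query", "update"])]

-- _reason(dominant, target)
def pvB_reason (dominant target : String) : String :=
  if dominant = "nonconst_path" then
    if target = "query" then "nonconst_path_prefers_query" else "nonconst_path_fallback_update"
  else if dominant = "nonconst_hash" ∨ dominant = "collision" then
    dominant ++ (if target = "init_dex" then "_dominates_init_explore" else "_fallback_" ++ target)
  else dominant ++ "_dominates"

-- Source B's canon loop: collect every canonicalised valid target (duplicates kept)
def pvB_canon (xs : List String) : List String :=
  xs.foldl (fun acc x =>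
    let sx := PySem.Str.lower (PySem.Str.strip x)
    let sx := if sx = "init" then "init_dex" else sx
    if sx = "init_dex" ∨ sx = "update" ∨ sx = "query" then acc ++ [sx] else acc) []

-- Source B's 'for t in prefs: if t in allowed: return t, _reason(...)' loop
def pvB_pick (allowed : List String) (dominant : String) : List String → Option (String × String)
  | [] => none
  | t :: rest => if t ∈ allowed then some (t, pvB_reason dominant t) else pvB_pick allowed dominant rest

def adaptive_single_tree_target_from_hints_py_alt (profile : Option (List (String × String))) (hints : Option (List (String × List String))) (allowed_targets : Option (List String)) (fallback : String) : String × String :=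
  let allowed := PySem.List.dedup (pvB_canon (allowed_targets.getD []))   -- list(dict.fromkeys(canon))
  let allowed := if allowed = [] then ["update", "query", "init_dex"] else allowed
  let prof_name := PySem.Str.lower (PySem.Str.strip ((PySem.Dict.mk (profile.getD [])).getD "name" ""))
  let dominant := pvB_dominant hints
  let prefs := pvB_prefs.getD dominant []
  -- if prefs and prefs[0] == "init_dex" and prof_name != "init_explore": prefs = prefs[1:]
  let prefs :=
    match prefs with
    | [] => []
    | p0 :: rest => if p0 = "init_dex" ∧ prof_name ≠ "init_explore" then rest else p0 :: rest
  match pvB_pick allowed dominant prefs with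
  | some tr => tr
  | none =>
    let fb := if fallback = "" then "update" else fallback
    if fb ∈ allowed then (fb, "fallback_default")
    else (PySem.List.pyGetD allowed 0 "", "normalize_to_allowed:fallback_default")

-- ===== PRECONDITION & SPEC =====
def Spec_adaptive_single_tree_target_from_hints_py (profile : Option (List (String × String))) (hints : Option (List (String × List String))) (allowed_targets : Option (List String)) (fallback : String) (out : String × String) : Prop := out = adaptive_single_tree_target_from_hints_py_alt profile hints allowed_targets fallback
instance (profile : Option (List (String × String))) (hints : Option (List (String × List String))) (allowed_targets : Option (List String)) (fallback : String) (out : String × String) : Decidable (Spec_adaptive_single_tree_target_from_hints_py profile hints allowed_targets fallback out) := by unfold Spec_adaptive_single_tree_target_from_hints_py; infer_instance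

-- ===== CLAIM (what is proved, stated in full; the proofs are below) =====
def Claim_equal_adaptive_single_tree_target_from_hints_py : Prop := ∀ (profile : Option (List (String × String))) (hints : Option (List (String × List String))) (allowed_targets : Option (List String)) (fallback : String), Dom_adaptive_single_tree_target_from_hints_py profile hints allowed_targets fallback → Spec_adaptive_single_tree_target_from_hints_py profile hints allowed_targets fallback (adaptive_single_tree_target_from_hints_py profile hints allowed_targets fallback)

-- ===== LEMMAS AND PROOFS =====

-- the two helpers compute the same dominant bucket
theorem pv_firstBucket_eq (bs : List String) :
    (match (bs.map PySem.Str.strip).filter (fun b => b != "") with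
     | [] => ""
     | b :: _ => b) = pvB_firstBucket bs := by
  induction bs with
  | nil => rfl
  | cons x rest ih =>
    by_cases hx : PySem.Str.strip x = ""
    · simpa [pvB_firstBucket, hx] using ih
    · simp [pvB_firstBucket, hx, bne_iff_ne.mpr hx]

theorem pv_dominant_eq (hints : Option (List (String × List String))) : pvA_dominant hints = pvB_dominant hints := by
  cases hints with
  | none => rfl
  | some h => simpa [pvA_dominant, pvB_dominant] using pv_firstBucket_eq ((PySem.Dict.mk h).getD "failure_buckets" [])

-- the shared canonicalisation of one allowed-targets entry
def pvCanon (x : String) : Option String :=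
  let sx := PySem.Str.lower (PySem.Str.strip x)
  let sx := if sx = "init" then "init_dex" else sx
  if sx = "init_dex" ∨ sx = "update" ∨ sx = "query" then some sx else none

theorem pv_stepA_canon (acc : List String) (x : String) :
    pvA_step acc x = match pvCanon x with
      | some s => if s ∈ acc then acc else acc ++ [s]
      | none => acc := by
  simp only [pvA_step, pvCanon]
  by_cases h1 : PySem.Str.lower (PySem.Str.strip x) = "init" <;>
    by_cases h2 : PySem.Str.lower (PySem.Str.strip x) = "init_dex" <;>
    by_cases h3 : PySem.Str.lower (PySem.Str.strip x) = "update" <;>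
    by_cases h4 : PySem.Str.lower (PySem.Str.strip x) = "query" <;>
    simp_all

theorem pv_canonB_eq (xs : List String) (acc : List String) :
    xs.foldl (fun acc x =>
      let sx := PySem.Str.lower (PySem.Str.strip x)
      let sx := if sx = "init" then "init_dex" else sx
      if sx = "init_dex" ∨ sx = "update" ∨ sx = "query" then acc ++ [sx] else acc) acc
    = acc ++ xs.filterMap pvCanon := by
  induction xs generalizing acc with
  | nil => simp
  | cons x rest ih =>
    rw [List.foldl_cons, ih]
    simp only [pvCanon, List.filterMap_cons]
    split_ifs <;> simp

theorem pv_foldA_eq (xs : List String) (acc : List String) :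
    xs.foldl pvA_step acc
    = (xs.filterMap pvCanon).foldl (fun a s => if s ∈ a then a else a ++ [s]) acc := by
  induction xs generalizing acc with
  | nil => simp
  | cons x rest ih =>
    rw [List.foldl_cons, ih, pv_stepA_canon, List.filterMap_cons]
    cases hc : pvCanon x <;> simp [List.foldl_cons]

theorem pv_dedup_foldl (ys : List String) (acc : List String) :
    ys.foldl PySem.Set.add acc = ys.foldl (fun a s => if s ∈ a then a else a ++ [s]) acc := by
  induction ys generalizing acc with
  | nil => rfl
  | cons y rest ih =>
    simp only [List.foldl_cons, PySem.Set.add, PySem.Set.contains, ih]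
    split_ifs <;> simp_all

theorem pv_allowed_eq (ats : Option (List String)) :
    pvA_allowed ats =
      (let a := PySem.List.dedup (pvB_canon (ats.getD []))
       if a = [] then ["update", "query", "init_dex"] else a) := by
  simp only [pvA_allowed, pvB_canon, PySem.List.dedup_eq_ofList, PySem.Set.ofList_eq_foldl,
    pv_canonB_eq, List.nil_append, pv_foldA_eq, pv_dedup_foldl]

-- the _PREFS table lookup, closed form
theorem pv_prefs_get (s : String) : pvB_prefs.getD s [] =
    (if s = "bad_write_ctx" ∨ s = "real_write_zero" then ["update"]
     else if s = "query_date_zero" ∨ s = "read_error" ∨ s = "generic_read" then ["query"]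
     else if s = "nonconst_path" then ["query", "update"]
     else if s = "nonconst_hash" ∨ s = "collision" then ["init_dex", "query", "update"]
     else []) := by
  by_cases h1 : s = "bad_write_ctx";  · subst h1; decide
  by_cases h2 : s = "real_write_zero"; · subst h2; decide
  by_cases h3 : s = "query_date_zero"; · subst h3; decide
  by_cases h4 : s = "read_error"; · subst h4; decide
  by_cases h5 : s = "generic_read"; · subst h5; decide
  by_cases h6 : s = "nonconst_path"; · subst h6; decide
  by_cases h7 : s = "nonconst_hash"; · subst h7; decide
  by_cases h8 : s = "collision"; · subst h8; decide
  have h : pvB_prefs = PySem.Dict.mk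
    [("bad_write_ctx", ["update"]), ("real_write_zero", ["update"]),
     ("query_date_zero", ["query"]), ("read_error", ["query"]), ("generic_read", ["query"]),
     ("nonconst_path", ["query", "update"]),
     ("nonconst_hash", ["init_dex", "query", "update"]),
     ("collision", ["init_dex", "query", "update"])] := by decide
  rw [PySem.Dict.getD_eq_get?_getD, h]
  simp only [PySem.Dict.get?_mk_cons]
  simp [PySem.Dict.get?, beq_iff_eq, h1, h2, h3, h4, h5, h6, h7, h8,
    Ne.symm h1, Ne.symm h2, Ne.symm h3, Ne.symm h4, Ne.symm h5, Ne.symm h6, Ne.symm h7, Ne.symm h8]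

-- the cascade and the pref-scan agree
theorem pv_select_eq (allowed : List String) (prof_name dominant fallback : String) :
    pvA_select allowed prof_name dominant fallback =
      (let prefs := pvB_prefs.getD dominant []
       let prefs :=
         match prefs with
         | [] => []
         | p0 :: rest => if p0 = "init_dex" ∧ prof_name ≠ "init_explore" then rest else p0 :: rest
       match pvB_pick allowed dominant prefs with
       | some tr => tr
       | none =>
         let fb := if fallback = "" then "update" else fallback
         if fb ∈ allowed then (fb, "fallback_default")
         else (PySem.List.pyGetD allowed 0 "", "normalize_to_allowed:fallback_default")) := by
  rw [pv_prefs_get]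
  simp only [pvA_select]
  by_cases h1 : dominant = "bad_write_ctx" ∨ dominant = "real_write_zero"
  · rcases h1 with h | h <;> subst h <;>
      by_cases hu : "update" ∈ allowed <;>
      by_cases hf : (if fallback = "" then "update" else fallback) ∈ allowed <;>
      simp [pvB_pick, pvB_reason, hu, hf]
  · by_cases h2 : dominant = "query_date_zero" ∨ dominant = "read_error" ∨ dominant = "generic_read"
    · rcases h2 with h | h | h <;> subst h <;>
        by_cases hq : "query" ∈ allowed <;>
        by_cases hf : (if fallback = "" then "update" else fallback) ∈ allowed <;>
        simp [pvB_pick, pvB_reason, hq, hf]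
    · by_cases h3 : dominant = "nonconst_path"
      · subst h3
        by_cases hq : "query" ∈ allowed <;> by_cases hu : "update" ∈ allowed <;>
          by_cases hf : (if fallback = "" then "update" else fallback) ∈ allowed <;>
          simp [pvB_pick, pvB_reason, hq, hu, hf]
      · by_cases h4 : dominant = "nonconst_hash" ∨ dominant = "collision"
        · rcases h4 with h | h <;> subst h <;>
            by_cases hp : prof_name = "init_explore" <;>
            by_cases hi : "init_dex" ∈ allowed <;>
            by_cases hq : "query" ∈ allowed <;>
            by_cases hu : "update" ∈ allowed <;>
            by_cases hf : (if fallback = "" then "update" else fallback) ∈ allowed <;>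
            simp [pvB_pick, pvB_reason, hp, hi, hq, hu, hf]
        · simp only [h1, h2, h3, h4, if_false]
          by_cases hf : (if fallback = "" then "update" else fallback) ∈ allowed <;>
            simp [pvB_pick, hf]

-- ===== VERDICT (by name: the statement is the Claim_ definition above) =====
theorem adaptive_single_tree_target_from_hints_py_spec : Claim_equal_adaptive_single_tree_target_from_hints_py := by
  intro profile hints allowed_targets fallback _
  unfold Spec_adaptive_single_tree_target_from_hints_py
  unfold adaptive_single_tree_target_from_hints_py adaptive_single_tree_target_from_hints_py_alt
  rw [pv_allowed_eq, pv_dominant_eq, pv_select_eq]
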